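-- pv_equiv track=rewrite | github.com/namhyun-gu/algorithm | programmers/monthly_code_challenges/season1/68646.py | solution
-- ===== SOURCE A (Python) =====
-- MAX = 1_000_000_001
--
-- def solution(a):
--     answer = 0
--     left, right = MAX, MAX
--     map = [[0, 0] for _ in range(len(a))]
--     for idx in range(len(a)):
--         left = min(left, a[idx])
--         map[idx][0] = left
--
--     for idx in reversed(range(len(a))):
--         right = min(right, a[idx])
--         map[idx][1] = right
--
--     for idx in range(len(a)):
--         if a[idx] <= map[idx][0] or a[idx] <= map[idx][1]:
--             answer += 1
--     return answer
-- ===== SOURCE B (Python) =====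
-- MAX = 1_000_000_001
--
-- def solution(a):
--     left = set()
--     cur = MAX
--     for idx in range(len(a)):
--         if a[idx] <= cur:
--             left.add(idx)
--         cur = min(cur, a[idx])
--     right = set()
--     cur = MAX
--     for idx in reversed(range(len(a))):
--         if a[idx] <= cur:
--             right.add(idx)
--         cur = min(cur, a[idx])
--     return len(left | right)
-- ===== Notes on version B (the rewrite author's own statement) =====
-- stated objective: simpler
-- what changed: A builds a length-n array of prefix/suffix minima in two loops and counts with a third loop; B drops the array and the third loop, directly collecting qualifying indices during each scan into two sets (comparing each element against the running minimum before updating it) and returning the size of their union.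
import Mathlib
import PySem

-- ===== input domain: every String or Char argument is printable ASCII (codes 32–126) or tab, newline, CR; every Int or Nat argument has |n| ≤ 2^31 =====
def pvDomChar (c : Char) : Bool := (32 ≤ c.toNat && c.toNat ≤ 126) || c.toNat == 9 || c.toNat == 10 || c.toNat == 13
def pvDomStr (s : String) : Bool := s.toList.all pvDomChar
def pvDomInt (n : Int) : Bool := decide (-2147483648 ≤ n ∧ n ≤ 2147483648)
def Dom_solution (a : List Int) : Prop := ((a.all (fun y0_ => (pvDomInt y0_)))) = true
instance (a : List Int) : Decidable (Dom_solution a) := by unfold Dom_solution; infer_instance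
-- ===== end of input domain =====

-- B replaces A's prefix/suffix-min array plus a third counting pass by two scans that
-- directly collect the qualifying indices into sets and return the size of their union
-- (objective: simpler — one array and one loop fewer).


-- ===== PORT A =====
-- MAX = 1_000_000_001
def pvMAX : Int := 1000000001

-- a[idx] with 0 ≤ idx < len a is ported as a.getD idx 0 (always in range, so exact);
-- the list-of-pairs `map` is updated with List.set, read with getD (indices are in range).
def solution (a : List Int) : Int :=
  let n := a.length
  let m0 : List (Int × Int) := List.replicate n (0, 0)
  let s1 : Int × List (Int × Int) :=
    (List.range n).foldl (fun st idx =>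
      let left := min st.1 (a.getD idx 0)
      (left, st.2.set idx (left, (st.2.getD idx (0, 0)).2))) (pvMAX, m0)
  let s2 : Int × List (Int × Int) :=
    (List.range n).reverse.foldl (fun st idx =>
      let right := min st.1 (a.getD idx 0)
      (right, st.2.set idx ((st.2.getD idx (0, 0)).1, right))) (pvMAX, s1.2)
  (List.range n).foldl (fun ans idx =>
      if a.getD idx 0 ≤ (s2.2.getD idx (0, 0)).1 ∨ a.getD idx 0 ≤ (s2.2.getD idx (0, 0)).2
      then ans + 1 else ans) 0

-- ===== PORT B =====
def solution_alt (a : List Int) : Int :=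
  let n := a.length
  let s1 : PySem.Set Int × Int :=
    (List.range n).foldl (fun st idx =>
      ((if a.getD idx 0 ≤ st.2 then PySem.Set.add st.1 ((idx : Nat) : Int) else st.1),
       min st.2 (a.getD idx 0))) (PySem.Set.empty, pvMAX)
  let s2 : PySem.Set Int × Int :=
    (List.range n).reverse.foldl (fun st idx =>
      ((if a.getD idx 0 ≤ st.2 then PySem.Set.add st.1 ((idx : Nat) : Int) else st.1),
       min st.2 (a.getD idx 0))) (PySem.Set.empty, pvMAX)
  PySem.Set.len (PySem.Set.union s1.1 s2.1)

-- ===== PRECONDITION & SPEC =====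
def Spec_solution (a : List Int) (out : Int) : Prop := out = solution_alt a
instance (a : List Int) (out : Int) : Decidable (Spec_solution a out) := by unfold Spec_solution; infer_instance

-- ===== CLAIM (what is proved, stated in full; the proofs are below) =====
def Claim_equal_solution : Prop := ∀ (a : List Int), Dom_solution a → Spec_solution a (solution a)

-- ===== LEMMAS AND PROOFS =====

-- "index i qualifies through the prefix": a[i] ≤ min of a[0..i-1] (MAX for i = 0)
def pvCondL (a : List Int) (i : Nat) : Bool :=
  decide (a.getD i 0 ≤ (a.take i).foldl min pvMAX)

-- "index i qualifies through the suffix": a[i] ≤ min of a[i+1..] (MAX for the last i)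
def pvCondR (a : List Int) (i : Nat) : Bool :=
  decide (a.getD i 0 ≤ (a.drop (i + 1)).foldl min pvMAX)

-- the common count both programs compute
def pvCnt (a : List Int) : Int :=
  (((List.range a.length).filter (fun i => pvCondL a i || pvCondR a i)).length : Int)

-- getD after set
theorem pv_getD_set {α : Type} (l : List α) (i j : Nat) (v d : α) :
    (l.set i v).getD j d = if i = j ∧ i < l.length then v else l.getD j d := by
  simp only [List.getD_eq_getElem?_getD, List.getElem?_set]
  by_cases h1 : i = j
  · subst h1
    by_cases h2 : i < l.length <;> simp [h2]
  · simp [h1]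

-- getD of a map over range
theorem pv_getD_map_range {α : Type} (n i : Nat) (f : Nat → α) (d : α) (h : i < n) :
    (((List.range n).map f).getD i d) = f i := by
  simp [List.getD_eq_getElem?_getD, List.getElem?_map, List.getElem?_range h]

-- pulling one min out of a fold
theorem pv_foldl_min_comm (l : List Int) (c x : Int) :
    l.foldl min (min c x) = min (l.foldl min c) x := by
  induction l generalizing c with
  | nil => rfl
  | cons b t ih =>
    simp only [List.foldl_cons]
    rw [min_right_comm c x b, ih]

theorem pv_take_succ_getD (a : List Int) (i : Nat) (h : i < a.length) :
    a.take (i + 1) = a.take i ++ [a.getD i 0] := by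
  rw [List.take_succ]
  simp [List.getElem?_eq_getElem h, List.getD_eq_getElem?_getD]

theorem pv_foldl_min_take_succ (a : List Int) (i : Nat) (h : i < a.length) (c : Int) :
    (a.take (i + 1)).foldl min c = min ((a.take i).foldl min c) (a.getD i 0) := by
  rw [pv_take_succ_getD a i h, List.foldl_append]
  rfl

-- the window a[i+1..k] grows by a[k] when the right edge moves from k to k+1
theorem pv_take_window (a : List Int) (i k : Nat) (hik : i < k) (hk : k < a.length) :
    (a.drop (i + 1)).take (k - i) = (a.drop (i + 1)).take (k - 1 - i) ++ [a.getD k 0] := by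
  have h1 : k - i = (k - 1 - i) + 1 := by omega
  rw [h1, List.take_succ]
  congr 1
  have hki' : k - 1 - i < (a.drop (i + 1)).length := by
    simp only [List.length_drop]; omega
  have hidx : i + 1 + (k - 1 - i) = k := by omega
  rw [List.getElem?_drop, hidx]
  simp [List.getD_eq_getElem?_getD, List.getElem?_eq_getElem hk]

-- counting loop = filter length
theorem pv_foldl_count (l : List Nat) (p : Nat → Prop) [DecidablePred p] (z : Int) :
    l.foldl (fun ans i => if p i then ans + 1 else ans) z
      = z + ((l.filter (fun i => decide (p i))).length : Int) := by
  induction l generalizing z with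
  | nil => simp
  | cons b t ih =>
    by_cases h : p b <;> simp [h, ih] <;> push_cast <;> ring

-- countP arithmetic: |p| + |q ∧ ¬p| = |p ∨ q|
theorem pv_countP_or (l : List Nat) (p q : Nat → Bool) :
    (l.filter p).length + (l.filter (fun x => q x && !p x)).length
      = (l.filter (fun x => p x || q x)).length := by
  induction l with
  | nil => rfl
  | cons b t ih =>
    by_cases hp : p b <;> by_cases hq : q b <;> simp [hp, hq, ← ih] <;> omega

-- Python set union with a duplicate-free right argument is append-the-new-ones
theorem pv_union_nodup (t s : List Int) (ht : t.Nodup) :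
    PySem.Set.union s t = s ++ t.filter (fun x => !(s.contains x)) := by
  induction t generalizing s with
  | nil => simp [PySem.Set.union, PySem.Set.update]
  | cons b u ih =>
    have hbu : b ∉ u := (List.nodup_cons.mp ht).1
    have hu : u.Nodup := (List.nodup_cons.mp ht).2
    simp only [PySem.Set.union, PySem.Set.update, List.foldl_cons, List.filter_cons]
    by_cases hb : b ∈ s
    · rw [PySem.Set.add_of_mem hb]
      have := ih s hu
      simp only [PySem.Set.union, PySem.Set.update] at this
      rw [this]
      simp [hb]
    · rw [PySem.Set.add_of_not_mem hb]
      have := ih (s ++ [b]) hu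
      simp only [PySem.Set.union, PySem.Set.update] at this
      rw [this]
      have hfe : u.filter (fun x => !((s ++ [b]).contains x))
          = u.filter (fun x => !(s.contains x)) := by
        apply List.filter_congr
        intro x hx
        have hxb : x ≠ b := fun h => hbu (h ▸ hx)
        simp [hxb]
      rw [hfe]
      simp [hb]

-- ----- characterisation of A -----

-- first loop of A: running prefix minima written into the first components
theorem pvA_loop1 (a : List Int) (m : Nat) (hm : m ≤ a.length) :
    (List.range m).foldl (fun st idx =>
        let left := min st.1 (a.getD idx 0)
        (left, st.2.set idx (left, (st.2.getD idx (0, 0)).2)))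
      ((pvMAX : Int), (List.replicate a.length ((0 : Int), (0 : Int))))
    = ((a.take m).foldl min pvMAX,
       (List.range a.length).map (fun i =>
          (if i < m then (a.take (i + 1)).foldl min pvMAX else 0, (0 : Int)))) := by
  induction m with
  | zero =>
    simp only [List.range_zero, List.foldl_nil, List.take_zero, List.foldl_nil]
    rw [Prod.mk.injEq]
    refine ⟨rfl, ?_⟩
    have : (List.range a.length).map (fun i =>
        ((if i < 0 then (a.take (i + 1)).foldl min pvMAX else 0 : Int), (0 : Int)))
        = (List.range a.length).map (fun _ => ((0 : Int), (0 : Int))) := by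
      apply List.map_congr_left; intro i _; simp
    rw [this, List.map_const', List.length_range]
  | succ k ih =>
    have hk : k ≤ a.length := Nat.le_of_succ_le hm
    have hklt : k < a.length := hm
    rw [List.range_succ, List.foldl_append, ih hk]
    simp only [List.foldl_cons, List.foldl_nil]
    rw [pv_getD_map_range _ _ _ _ hklt]
    rw [Prod.mk.injEq]
    refine ⟨?_, ?_⟩
    · rw [pv_foldl_min_take_succ a k hklt]
    · apply List.ext_getElem
      · simp
      · intro i h1 h2
        simp only [List.length_set, List.length_map, List.length_range] at h1 h2
        have hgel : ∀ (f : Nat → Int × Int) (hh : i < ((List.range a.length).map f).length),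
            ((List.range a.length).map f)[i]'hh = f i := by
          intro f hh; simp
        by_cases hki : k = i
        · subst hki
          rw [List.getElem_set_self (by simpa using h1), hgel]
          simp [pv_foldl_min_take_succ a k hklt, hklt]
        · rw [List.getElem_set_ne hki, hgel, hgel]
          have : (i < k + 1) ↔ (i < k) := by omega
          simp only [this]

-- second loop of A (processed back to front), generalized over the running min and the array
theorem pvA_loop2 (a : List Int) (m : Nat) (hm : m ≤ a.length) (c : Int) (L : List (Int × Int))
    (hL : L.length = a.length) :
    ((List.range m).reverse.foldl (fun st idx =>
        let right := min st.1 (a.getD idx 0)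
        (right, st.2.set idx ((st.2.getD idx (0, 0)).1, right))) (c, L)).2
    = (List.range a.length).map (fun i =>
        if i < m then ((L.getD i (0, 0)).1, ((a.drop i).take (m - i)).foldl min c)
        else L.getD i (0, 0)) := by
  induction m generalizing c L with
  | zero =>
    simp only [List.range_zero, List.reverse_nil, List.foldl_nil, Nat.not_lt_zero, if_false]
    apply List.ext_getElem
    · simp [hL]
    · intro i h1 h2
      have hi : i < a.length := by simpa using h2
      simp [List.getD_eq_getElem?_getD, List.getElem?_eq_getElem (by omega : i < L.length)]
  | succ k ih =>
    have hk : k ≤ a.length := Nat.le_of_succ_le hm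
    have hklt : k < a.length := hm
    rw [List.range_succ, List.reverse_append]
    simp only [List.reverse_cons, List.reverse_nil, List.nil_append, List.singleton_append,
      List.foldl_cons]
    rw [ih hk (min c (a.getD k 0)) (L.set k ((L.getD k (0, 0)).1, min c (a.getD k 0)))
        (by simp [hL])]
    apply List.ext_getElem
    · simp
    · intro i h1 h2
      simp only [List.length_map, List.length_range] at h1 h2
      simp only [List.getElem_map, List.getElem_range]
      have hgd : (L.set k ((L.getD k (0, 0)).1, min c (a.getD k 0))).getD i (0, 0)
          = if k = i then ((L.getD k (0, 0)).1, min c (a.getD k 0)) else L.getD i (0, 0) := by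
        rw [pv_getD_set]
        by_cases hki : k = i
        · rw [if_pos ⟨hki, by omega⟩, if_pos hki]
        · rw [if_neg (fun h => hki h.1), if_neg hki]
      by_cases hik : i < k
      · have hik1 : i < k + 1 := Nat.lt_succ_of_lt hik
        rw [if_pos hik, if_pos hik1, hgd, if_neg (by omega)]
        congr 1
        -- suffix window: a[i..k] = a[i..k-1] ++ [a[k]]
        have hdt : (a.drop i).take (k + 1 - i) = (a.drop i).take (k - i) ++ [a.getD k 0] := by
          have h3 : k + 1 - i = (k - i) + 1 := by omega
          rw [h3, List.take_succ]
          congr 1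
          have hki' : k - i < (a.drop i).length := by simp only [List.length_drop]; omega
          have hidx : i + (k - i) = k := by omega
          rw [List.getElem?_drop, hidx]
          simp [List.getD_eq_getElem?_getD, List.getElem?_eq_getElem hklt]
        rw [hdt, List.foldl_append]
        simp only [List.foldl_cons, List.foldl_nil]
        rw [pv_foldl_min_comm]
      · by_cases hik2 : i < k + 1
        · have hik3 : i = k := by omega
          subst hik3
          rw [if_neg hik, if_pos hik2, hgd, if_pos rfl]
          have h4 : i + 1 - i = 1 := by omega
          rw [h4]
          have h5 : (a.drop i).take 1 = [a.getD i 0] := by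
            rw [List.drop_eq_getElem_cons hklt]
            show [a[i]] = [a.getD i 0]
            simp [List.getD_eq_getElem?_getD, List.getElem?_eq_getElem hklt]
          rw [h5]
          rfl
        · rw [if_neg hik, if_neg hik2, hgd, if_neg (by omega)]

-- A computes pvCnt
theorem pvA_eq_cnt (a : List Int) : solution a = pvCnt a := by
  unfold solution
  dsimp only
  rw [pvA_loop1 a a.length (le_refl _)]
  rw [pvA_loop2 a a.length (le_refl _) pvMAX _ (by simp)]
  rw [pv_foldl_count]
  unfold pvCnt
  rw [zero_add]
  congr 2
  apply List.filter_congr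
  intro i hi
  have hin : i < a.length := List.mem_range.mp hi
  rw [pv_getD_map_range _ _ _ _ hin, if_pos hin,
      pv_getD_map_range _ _ _ _ hin, if_pos hin]
  have hdrop : (a.drop i).take (a.length - i) = a.drop i := by
    apply List.take_of_length_le
    simp [List.length_drop]
  rw [hdrop]
  have h1 : (a.getD i 0 ≤ (a.take (i + 1)).foldl min pvMAX) ↔
      (a.getD i 0 ≤ (a.take i).foldl min pvMAX) := by
    rw [pv_foldl_min_take_succ a i hin]
    simp
  have h2 : (a.getD i 0 ≤ (a.drop i).foldl min pvMAX) ↔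
      (a.getD i 0 ≤ (a.drop (i + 1)).foldl min pvMAX) := by
    rw [List.drop_eq_getElem_cons hin]
    simp only [List.foldl_cons]
    have h3 : a[i] = a.getD i 0 := by
      simp [List.getD_eq_getElem?_getD, List.getElem?_eq_getElem hin]
    rw [h3, pv_foldl_min_comm]
    simp
  unfold pvCondL pvCondR
  simp only [List.getD_eq_getElem?_getD] at h1 h2 ⊢
  by_cases hA : a[i]?.getD 0 ≤ (a.take i).foldl min pvMAX <;>
    by_cases hB : a[i]?.getD 0 ≤ (a.drop (i + 1)).foldl min pvMAX <;>
      simp [hA, hB, h1, h2]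

-- ----- characterisation of B -----

-- forward loop of B collects the condL indices in increasing order
theorem pvB_loop1 (a : List Int) (m : Nat) (hm : m ≤ a.length) :
    (List.range m).foldl (fun st idx =>
        ((if a.getD idx 0 ≤ st.2 then PySem.Set.add st.1 ((idx : Nat) : Int) else st.1),
         min st.2 (a.getD idx 0))) ((PySem.Set.empty : PySem.Set Int), pvMAX)
    = (((List.range m).filter (fun i => pvCondL a i)).map (fun (i : Nat) => (i : Int)),
       (a.take m).foldl min pvMAX) := by
  induction m with
  | zero => simp [PySem.Set.empty]
  | succ k ih =>
    have hk : k ≤ a.length := Nat.le_of_succ_le hm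
    have hklt : k < a.length := hm
    rw [List.range_succ, List.foldl_append, ih hk]
    simp only [List.foldl_cons, List.foldl_nil, List.filter_append]
    rw [Prod.mk.injEq]
    refine ⟨?_, ?_⟩
    · by_cases h : a.getD k 0 ≤ (a.take k).foldl min pvMAX
      · rw [if_pos h]
        have hnm : ((k : Nat) : Int) ∉ ((List.range k).filter (fun i => pvCondL a i)).map
            (fun (i : Nat) => (i : Int)) := by
          intro hmem
          rcases List.mem_map.mp hmem with ⟨j, hj, hji⟩
          have hjk : j < k := List.mem_range.mp (List.mem_of_mem_filter hj)
          have : j = k := by simpa using hji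
          omega
        rw [PySem.Set.add_of_not_mem hnm]
        have hc : pvCondL a k = true := by unfold pvCondL; exact decide_eq_true h
        simp [hc]
      · rw [if_neg h]
        have hc : pvCondL a k = false := by unfold pvCondL; simpa using h
        simp [hc]
    · rw [pv_foldl_min_take_succ a k hklt]

-- backward loop of B, generalized over the running min and the already-collected set
theorem pvB_loop2 (a : List Int) (m : Nat) (hm : m ≤ a.length) (c : Int) (s : PySem.Set Int)
    (hs : ∀ i : Nat, i < m → ((i : Int) ∈ s → False)) :
    ((List.range m).reverse.foldl (fun st idx =>
        ((if a.getD idx 0 ≤ st.2 then PySem.Set.add st.1 ((idx : Nat) : Int) else st.1),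
         min st.2 (a.getD idx 0))) (s, c)).1
    = s ++ ((List.range m).reverse.filter
        (fun i => decide (a.getD i 0 ≤ ((a.drop (i + 1)).take (m - 1 - i)).foldl min c))).map
        (fun (i : Nat) => (i : Int)) := by
  induction m generalizing c s with
  | zero => simp
  | succ k ih =>
    have hk : k ≤ a.length := Nat.le_of_succ_le hm
    have hklt : k < a.length := hm
    rw [List.range_succ, List.reverse_append]
    simp only [List.reverse_cons, List.reverse_nil, List.nil_append, List.singleton_append,
      List.foldl_cons, List.filter_cons]
    have hwin : k + 1 - 1 - k = 0 := by omega
    have hguard : ((a.drop (k + 1)).take (k + 1 - 1 - k)).foldl min c = c := by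
      rw [hwin]; rfl
    have hs'mem : ∀ i : Nat, i < k →
        ((i : Int) ∈ (if a.getD k 0 ≤ c then PySem.Set.add s ((k : Nat) : Int) else s)
          → False) := by
      intro i hi hmem
      by_cases hg : a.getD k 0 ≤ c
      · rw [if_pos hg] at hmem
        rcases (PySem.Set.mem_add s _ _).mp hmem with h | h
        · exact hs i (by omega) h
        · have : i = k := by simpa using h
          omega
      · rw [if_neg hg] at hmem
        exact hs i (by omega) hmem
    rw [ih hk (min c (a.getD k 0)) _ hs'mem]
    have hfe : (List.range k).reverse.filter
          (fun i => decide (a.getD i 0 ≤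
            ((a.drop (i + 1)).take (k - 1 - i)).foldl min (min c (a.getD k 0))))
        = (List.range k).reverse.filter
          (fun i => decide (a.getD i 0 ≤
            ((a.drop (i + 1)).take (k + 1 - 1 - i)).foldl min c)) := by
      apply List.filter_congr
      intro i hi
      have hik : i < k := List.mem_range.mp (List.mem_reverse.mp hi)
      have h6 : k + 1 - 1 - i = k - i := by omega
      rw [h6, pv_take_window a i k hik hklt, List.foldl_append]
      simp only [List.foldl_cons, List.foldl_nil]
      rw [pv_foldl_min_comm]
      rfl
    rw [hfe]
    by_cases hg : a.getD k 0 ≤ c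
    · rw [if_pos hg]
      have hgd : decide (a.getD k 0 ≤ ((a.drop (k + 1)).take (k + 1 - 1 - k)).foldl min c)
          = true := by rw [hguard]; exact decide_eq_true hg
      rw [hgd]
      have hkn : ((k : Nat) : Int) ∉ s := fun h => hs k (Nat.lt_succ_self k) h
      rw [PySem.Set.add_of_not_mem hkn]
      simp
    · rw [if_neg hg]
      have hgd : decide (a.getD k 0 ≤ ((a.drop (k + 1)).take (k + 1 - 1 - k)).foldl min c)
          = false := by rw [hguard]; simpa using hg
      rw [hgd]
      simp

-- B computes pvCnt
theorem pvB_eq_cnt (a : List Int) : solution_alt a = pvCnt a := by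
  unfold solution_alt
  dsimp only
  rw [pvB_loop1 a a.length (le_refl _)]
  rw [pvB_loop2 a a.length (le_refl _) pvMAX PySem.Set.empty (by intro i _ h; simp [PySem.Set.empty] at h)]
  -- replace the windowed suffix condition by pvCondR on the members of range
  have hR : (List.range a.length).reverse.filter
        (fun i => decide (a.getD i 0 ≤
          ((a.drop (i + 1)).take (a.length - 1 - i)).foldl min pvMAX))
      = (List.range a.length).reverse.filter (fun i => pvCondR a i) := by
    apply List.filter_congr
    intro i hi
    have hin : i < a.length := List.mem_range.mp (List.mem_reverse.mp hi)
    have hdrop : (a.drop (i + 1)).take (a.length - 1 - i) = a.drop (i + 1) := by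
      apply List.take_of_length_le
      simp only [List.length_drop]
      omega
    rw [hdrop]
    rfl
  rw [hR]
  simp only [PySem.Set.empty, List.nil_append]
  -- the right-hand set is duplicate-free
  have hnd : (((List.range a.length).reverse.filter (fun i => pvCondR a i)).map
      (fun (i : Nat) => (i : Int))).Nodup := by
    apply List.Nodup.map
    · intro x y hxy; simpa using hxy
    · exact List.Nodup.filter _ (List.nodup_reverse.mpr List.nodup_range)
  rw [pv_union_nodup _ _ hnd]
  simp only [PySem.Set.len]
  rw [List.length_append]
  -- membership in the left set is exactly pvCondL (for indices < n)
  have hmemL : ∀ i : Nat, i < a.length →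
      ((((List.range a.length).filter (fun i => pvCondL a i)).map
        (fun (i : Nat) => (i : Int))).contains ((i : Nat) : Int) = pvCondL a i) := by
    intro i hin
    by_cases hc : pvCondL a i = true
    · have : ((i : Nat) : Int) ∈ ((List.range a.length).filter (fun i => pvCondL a i)).map
          (fun (i : Nat) => (i : Int)) := by
        exact List.mem_map.mpr ⟨i, List.mem_filter.mpr ⟨List.mem_range.mpr hin, hc⟩, rfl⟩
      simp [hc, this]
    · have : ((i : Nat) : Int) ∉ ((List.range a.length).filter (fun i => pvCondL a i)).map
          (fun (i : Nat) => (i : Int)) := by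
        intro hmem
        rcases List.mem_map.mp hmem with ⟨j, hj, hji⟩
        have hjc := (List.mem_filter.mp hj).2
        have : j = i := by simpa using hji
        subst this
        exact hc hjc
      simp only [Bool.not_eq_true] at hc
      rw [hc]
      simpa using this
  -- rewrite the second filter through the map
  have hfm : (((List.range a.length).reverse.filter (fun i => pvCondR a i)).map
        (fun (i : Nat) => (i : Int))).filter
        (fun x => !((((List.range a.length).filter (fun i => pvCondL a i)).map
          (fun (i : Nat) => (i : Int))).contains x))
      = (((List.range a.length).reverse.filter (fun i => pvCondR a i)).filter
          (fun i => !(pvCondL a i))).map (fun (i : Nat) => (i : Int)) := by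
    rw [List.filter_map]
    congr 1
    apply List.filter_congr
    intro i hi
    have hin : i < a.length := List.mem_range.mp (List.mem_reverse.mp (List.mem_of_mem_filter hi))
    simp only [Function.comp_apply]
    rw [hmemL i hin]
  rw [hfm]
  unfold pvCnt
  rw [List.length_map, List.length_map]
  have hlen2 : (List.filter (fun i => !pvCondL a i)
        ((List.range a.length).reverse.filter (fun i => pvCondR a i))).length
      = ((List.range a.length).filter (fun i => pvCondR a i && !pvCondL a i)).length := by
    rw [List.filter_filter]
    rw [← List.countP_eq_length_filter, ← List.countP_eq_length_filter, List.countP_reverse]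
    apply List.countP_congr
    intro x _
    cases hp : pvCondL a x <;> cases hq : pvCondR a x <;> simp [hp, hq]
  rw [hlen2]
  rw [← pv_countP_or (List.range a.length) (fun i => pvCondL a i) (fun i => pvCondR a i)]

-- ===== VERDICT (by name: the statement is the Claim_ definition above) =====
theorem solution_spec : Claim_equal_solution := by
  unfold Claim_equal_solution
  intro a _
  unfold Spec_solution
  rw [pvA_eq_cnt, pvB_eq_cnt]
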